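-- pv_equiv track=rewrite | github.com/MrLittleKitty/SearchEngine | SearchEngine.py | iterTokens
-- ===== SOURCE A (Python) =====
-- def iterTokens(string):
--     val = []
--     for character in string:
--         if character.isalnum():
--             val.append(character)
--         else:
--             yield "".join(val)
--             del val[:]
--     if len(val) > 0:
--         yield "".join(val)
-- ===== SOURCE B (Python) =====
-- def iterTokens(string):
--     # index-table pass: collect delimiter positions, then slice between them
--     delims = [i for i, c in enumerate(string) if not c.isalnum()]
--     prev = -1
--     for i in delims:
--         yield string[prev + 1:i]
--         prev = i
--     if prev + 1 < len(string):
--         yield string[prev + 1:]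
-- ===== Notes on version B (the rewrite author's own statement) =====
-- stated objective: alternative
-- what changed: Instead of accumulating characters one by one and flushing a buffer at each delimiter, B first builds an index table of all delimiter positions in one pass and then yields slices of the original string between consecutive delimiter positions.
import Mathlib
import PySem

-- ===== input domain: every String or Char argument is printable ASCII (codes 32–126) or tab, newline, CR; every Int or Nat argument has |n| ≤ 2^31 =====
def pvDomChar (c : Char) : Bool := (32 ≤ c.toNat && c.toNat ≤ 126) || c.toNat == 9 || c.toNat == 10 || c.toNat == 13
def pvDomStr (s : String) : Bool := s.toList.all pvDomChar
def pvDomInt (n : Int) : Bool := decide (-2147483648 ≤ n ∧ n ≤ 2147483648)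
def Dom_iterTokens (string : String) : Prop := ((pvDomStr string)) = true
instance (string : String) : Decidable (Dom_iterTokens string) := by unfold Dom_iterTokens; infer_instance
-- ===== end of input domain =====

-- B replaces A's character-accumulator loop by a delimiter-position index table plus slicing; alternative decomposition, same cost.


-- ===== PORT A =====
-- the loop body of A: state is (yielded tokens so far, current char buffer `val`)
def iterTokensStepA (acc : List String × List Char) (c : Char) : List String × List Char :=
  if PySem.Chars.isalnum c then (acc.1, acc.2 ++ [c])
  else (acc.1 ++ [String.ofList acc.2], [])

def iterTokens (string : String) : List String :=
  let r := string.toList.foldl iterTokensStepA ([], [])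
  if r.2.length > 0 then r.1 ++ [String.ofList r.2] else r.1

-- ===== PORT B =====
-- the loop body of B: state is (yielded tokens so far, prev)
def iterTokensStepB (L : List Char) (acc : List String × Int) (i : Int) : List String × Int :=
  (acc.1 ++ [String.ofList (PySem.List.slice L (some (acc.2 + 1)) (some i))], i)

def iterTokens_alt (string : String) : List String :=
  let L := string.toList
  let delims := ((PySem.List.enumerate L 0).filter (fun p => !PySem.Chars.isalnum p.2)).map (·.1)
  let r := delims.foldl (iterTokensStepB L) ([], -1)
  if r.2 + 1 < (L.length : Int) then
    r.1 ++ [String.ofList (PySem.List.slice L (some (r.2 + 1)) none)]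
  else r.1

-- ===== PRECONDITION & SPEC =====
def Spec_iterTokens (string : String) (out : List String) : Prop := out = iterTokens_alt string
instance (string : String) (out : List String) : Decidable (Spec_iterTokens string out) := by unfold Spec_iterTokens; infer_instance

-- ===== CLAIM (what is proved, stated in full; the proofs are below) =====
def Claim_equal_iterTokens : Prop := ∀ (string : String), Dom_iterTokens string → Spec_iterTokens string (iterTokens string)

-- ===== LEMMAS AND PROOFS =====

-- A's run, written as structural recursion on the remaining characters
def runA (val : List Char) : List Char → List String
  | [] => if val.length > 0 then [String.ofList val] else []
  | c :: t => if PySem.Chars.isalnum c then runA (val ++ [c]) t else String.ofList val :: runA [] t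

-- finishing step of A (trailing buffer flush)
def finishA (r : List String × List Char) : List String :=
  if r.2.length > 0 then r.1 ++ [String.ofList r.2] else r.1

lemma foldA_eq_runA (l : List Char) : ∀ (out : List String) (val : List Char),
    finishA (l.foldl iterTokensStepA (out, val)) = out ++ runA val l := by
  induction l with
  | nil =>
      intro out val
      simp only [List.foldl, finishA, runA]
      split <;> simp
  | cons c t ih =>
      intro out val
      simp only [List.foldl, iterTokensStepA, runA]
      by_cases h : PySem.Chars.isalnum c = true
      · simp [h, ih]
      · simp [h, ih, List.append_assoc]

-- finishing step of B (trailing slice)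
def finishB (L : List Char) (r : List String × Int) : List String :=
  if r.2 + 1 < (L.length : Int) then
    r.1 ++ [String.ofList (PySem.List.slice L (some (r.2 + 1)) none)]
  else r.1

lemma foldB_acc (L : List Char) (p : List Int) : ∀ (out : List String) (prev : Int),
    finishB L (p.foldl (iterTokensStepB L) (out, prev))
      = out ++ finishB L (p.foldl (iterTokensStepB L) ([], prev)) := by
  induction p with
  | nil =>
      intro out prev
      simp only [List.foldl, finishB]
      split <;> simp
  | cons i rest ih =>
      intro out prev
      simp only [List.foldl, iterTokensStepB]
      rw [ih (out ++ [String.ofList (PySem.List.slice L (some (prev + 1)) (some i))]) i,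
          ih ([] ++ [String.ofList (PySem.List.slice L (some (prev + 1)) (some i))]) i]
      simp

-- B's run over the delimiter table, written as structural recursion
def runB (L : List Char) (prev : Int) (p : List Int) : List String :=
  finishB L (p.foldl (iterTokensStepB L) ([], prev))

lemma runB_nil (L : List Char) (prev : Int) : runB L prev [] = finishB L ([], prev) := rfl

lemma runB_cons (L : List Char) (prev i : Int) (p : List Int) :
    runB L prev (i :: p)
      = String.ofList (PySem.List.slice L (some (prev + 1)) (some i)) :: runB L i p := by
  simp only [runB, List.foldl, iterTokensStepB]
  rw [foldB_acc]
  simp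

-- delimiter index table with a general start offset (Dl L 0 is B's `delims`)
def Dl (l : List Char) (s : Int) : List Int :=
  ((PySem.List.enumerate l s).filter (fun p => !PySem.Chars.isalnum p.2)).map (·.1)

lemma Dl_nil (s : Int) : Dl [] s = [] := rfl

lemma Dl_cons (c : Char) (t : List Char) (s : Int) :
    Dl (c :: t) s = if PySem.Chars.isalnum c then Dl t (s + 1) else s :: Dl t (s + 1) := by
  simp only [Dl, PySem.List.enumerate_cons, List.filter]
  by_cases h : PySem.Chars.isalnum c = true <;> simp [h]

lemma take_succ_of_drop {α : Type} (xs : List α) (m : Nat) (c : α) (t : List α)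
    (h : xs.drop m = c :: t) : xs.take (m + 1) = xs.take m ++ [c] := by
  have hm : xs[m]? = some c := by
    have h0 : (xs.drop m)[0]? = some c := by rw [h]; rfl
    rw [List.getElem?_drop] at h0
    simpa using h0
  simp [List.take_add_one, hm]

-- the main correspondence: B's slicing run over delimiters from position k
-- equals A's run on the suffix, with A's buffer holding L[s:k]
lemma main_corr (L : List Char) (l : List Char) : ∀ (s k : Nat), s ≤ k → L.drop k = l →
    runB L ((s : Int) - 1) (Dl l (k : Int)) = runA ((L.drop s).take (k - s)) l := by
  induction l with
  | nil =>
      intro s k hsk hdrop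
      have hlen : L.length ≤ k := List.drop_eq_nil_iff.mp hdrop
      have hval : (L.drop s).take (k - s) = L.drop s := by
        apply List.take_of_length_le
        simp [List.length_drop]; omega
      rw [Dl_nil, runB_nil, hval]
      simp only [finishB, runA]
      have harith : (s : Int) - 1 + 1 = ((s : Nat) : Int) := by ring
      rw [harith]
      by_cases hs : s < L.length
      · have hc1 : ((s : Nat) : Int) < (L.length : Int) := by exact_mod_cast hs
        have hc2 : 0 < (L.drop s).length := by simp [List.length_drop]; omega
        rw [if_pos hc1, if_pos (by omega : (L.drop s).length > 0)]
        simp [PySem.List.slice_from_natCast]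
      · have hc1 : ¬ (((s : Nat) : Int) < (L.length : Int)) := by
          exact_mod_cast not_lt.mpr (by omega)
        have hds : L.drop s = [] := List.drop_eq_nil_iff.mpr (by omega)
        rw [if_neg hc1, if_neg (by simp [hds])]
  | cons c t ih =>
      intro s k hsk hdrop
      have hdrop' : L.drop (k + 1) = t := by
        rw [← List.tail_drop, hdrop]; rfl
      rw [Dl_cons]
      by_cases h : PySem.Chars.isalnum c = true
      · rw [if_pos h]
        have hk1 : ((k : Nat) : Int) + 1 = (((k + 1 : Nat)) : Int) := by omega
        rw [hk1]
        have := ih s (k + 1) (by omega) hdrop'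
        rw [this]
        have hdd : (L.drop s).drop (k - s) = c :: t := by
          rw [List.drop_drop, show s + (k - s) = k by omega, hdrop]
        have htake : (L.drop s).take (k + 1 - s) = (L.drop s).take (k - s) ++ [c] := by
          rw [show k + 1 - s = k - s + 1 by omega]
          exact take_succ_of_drop (L.drop s) (k - s) c t hdd
        rw [htake]
        simp [runA, h]
      · rw [if_neg h]
        have harith : (s : Int) - 1 + 1 = ((s : Nat) : Int) := by ring
        rw [runB_cons, harith]
        have hslice : PySem.List.slice L (some ((s : Nat) : Int)) (some ((k : Nat) : Int))
            = (L.drop s).take (k - s) := PySem.List.slice_natCast L s k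
        have hk1 : ((k : Nat) : Int) = (((k + 1 : Nat)) : Int) - 1 := by omega
        have hk2 : ((k : Nat) : Int) + 1 = (((k + 1 : Nat)) : Int) := by omega
        rw [hslice, hk2] at *
        have := ih (k + 1) (k + 1) (le_refl _) hdrop'
        simp only [Nat.sub_self, List.take_zero] at this
        rw [hk1, this]
        simp [runA, h]

-- ===== VERDICT (by name: the statement is the Claim_ definition above) =====
theorem iterTokens_spec : Claim_equal_iterTokens := by
  intro s _
  unfold Spec_iterTokens
  have hA : iterTokens s = runA [] s.toList := by
    calc iterTokens s = finishA (s.toList.foldl iterTokensStepA ([], [])) := rfl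
      _ = [] ++ runA [] s.toList := foldA_eq_runA _ _ _
      _ = runA [] s.toList := by simp
  have hB : iterTokens_alt s = runB s.toList (-1) (Dl s.toList 0) := rfl
  have hmain := main_corr s.toList s.toList 0 0 (le_refl _) (by simp)
  simp only [Nat.cast_zero, zero_sub, Nat.sub_self, List.take_zero, List.drop_zero] at hmain
  rw [hA, hB, hmain]
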